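-- pv_equiv track=rewrite | github.com/leekh4232/study-coding-test | 프로그래머스/1/42840. 모의고사/모의고사.py | solution
-- ===== SOURCE A (Python) =====
-- def solution(answers):
--     # 수포자 1번의 찍는 패턴
--     pattern1 = [1, 2, 3, 4, 5]
--     # 수포자 2번의 찍는 패턴
--     pattern2 = [2, 1, 2, 3, 2, 4, 2, 5]
--     # 수포자 3번의 찍는 패턴
--     pattern3 = [3, 3, 1, 1, 2, 2, 4, 4, 5, 5]
--
--     # 각 수포자의 점수를 저장할 리스트 (1번, 2번, 3번 순서)
--     score = [0, 0, 0]
--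
--     # 결과를 저장할 리스트
--     result = []
--
--     # 정답 리스트를 하나씩 순회하며
--     for idx, answer in enumerate(answers):
--         # 수포자 1번의 현재 인덱스에 해당하는 패턴 값과 정답이 같은 경우 점수 +1
--         if answer == pattern1[idx % len(pattern1)]:
--             score[0] += 1
--         # 수포자 2번
--         if answer == pattern2[idx % len(pattern2)]:
--             score[1] += 1
--         # 수포자 3번
--         if answer == pattern3[idx % len(pattern3)]:
--             score[2] += 1
--
--     # 가장 높은 점수를 구함
--     maxScore = max(score)
--
--     # 최고 점수를 받은 수포자를 찾아 result 리스트에 저장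
--     for idx, s in enumerate(score):
--         if s == maxScore:
--             # 수포자 번호는 인덱스 + 1
--             result.append(idx + 1)
--
--     # 결과 리스트 반환
--     return result
-- ===== SOURCE B (Python) =====
-- def solution(answers):
--     patterns = [
--         [1, 2, 3, 4, 5],
--         [2, 1, 2, 3, 2, 4, 2, 5],
--         [3, 3, 1, 1, 2, 2, 4, 4, 5, 5],
--     ]
--     # Bucket the answers ONCE by (position mod 40, value): 40 = lcm of the three
--     # pattern periods, so a guesser's score is a fixed 40-entry table lookup sum.
--     cnt = {}
--     for i, a in enumerate(answers):
--         k = (i % 40, a)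
--         cnt[k] = cnt.get(k, 0) + 1
--     score = [sum(cnt.get((r, p[r % len(p)]), 0) for r in range(40)) for p in patterns]
--     m = max(score)
--     return [i + 1 for i, s in enumerate(score) if s == m]
-- ===== Notes on version B (the rewrite author's own statement) =====
-- stated objective: alternative
-- what changed: Replaces A's per-answer comparison against the three cyclic patterns with a single bucketing pass building a counter keyed by (index mod 40, answer) - 40 being the lcm of the pattern periods - after which each guesser's score is a fixed sum of 40 table lookups; the max-and-collect step stays.
import Mathlib
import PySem

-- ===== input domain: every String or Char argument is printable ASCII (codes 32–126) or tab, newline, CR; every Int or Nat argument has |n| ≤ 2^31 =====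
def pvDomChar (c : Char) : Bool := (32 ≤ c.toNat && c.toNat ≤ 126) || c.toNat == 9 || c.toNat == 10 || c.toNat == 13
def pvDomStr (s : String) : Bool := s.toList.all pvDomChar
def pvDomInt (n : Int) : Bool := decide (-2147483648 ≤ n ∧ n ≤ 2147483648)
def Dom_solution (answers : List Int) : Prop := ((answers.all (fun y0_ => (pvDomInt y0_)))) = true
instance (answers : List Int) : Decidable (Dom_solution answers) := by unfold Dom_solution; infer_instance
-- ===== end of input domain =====

-- B replaces A's per-answer comparison loop against the three patterns by a single
-- bucketing pass (a counter keyed by (index mod 40, answer); 40 = lcm of the pattern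
-- periods) followed by a fixed 40-entry table-lookup sum per guesser; alternative, same cost.

-- ===== PORT A =====
def solution (answers : List Int) : List Int :=
  let pattern1 : List Int := [1, 2, 3, 4, 5]
  let pattern2 : List Int := [2, 1, 2, 3, 2, 4, 2, 5]
  let pattern3 : List Int := [3, 3, 1, 1, 2, 2, 4, 4, 5, 5]
  -- the single loop over enumerate(answers), updating the three scores together
  let score : Int × Int × Int :=
    (PySem.List.enumerate answers 0).foldl
      (fun (s : Int × Int × Int) (ia : Int × Int) =>
        (if ia.2 = PySem.List.pyGetD pattern1 (PySem.Int.mod ia.1 5) 0 then s.1 + 1 else s.1,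
         if ia.2 = PySem.List.pyGetD pattern2 (PySem.Int.mod ia.1 8) 0 then s.2.1 + 1 else s.2.1,
         if ia.2 = PySem.List.pyGetD pattern3 (PySem.Int.mod ia.1 10) 0 then s.2.2 + 1 else s.2.2))
      (0, 0, 0)
  let scoreList : List Int := [score.1, score.2.1, score.2.2]
  let maxScore : Int := (PySem.List.max? scoreList (fun x => x)).getD 0
  (PySem.List.enumerate scoreList 0).foldl
    (fun acc (p : Int × Int) => if p.2 = maxScore then acc ++ [p.1 + 1] else acc) []

-- ===== PORT B =====
def solution_alt (answers : List Int) : List Int :=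
  let patterns : List (List Int) :=
    [[1, 2, 3, 4, 5], [2, 1, 2, 3, 2, 4, 2, 5], [3, 3, 1, 1, 2, 2, 4, 4, 5, 5]]
  -- cnt[k] = cnt.get(k, 0) + 1 over enumerate(answers), keyed by (i % 40, a)
  let cnt : PySem.Dict (Int × Int) Int :=
    (PySem.List.enumerate answers 0).foldl
      (fun d ia =>
        d.insert (PySem.Int.mod ia.1 40, ia.2) (d.getD (PySem.Int.mod ia.1 40, ia.2) 0 + 1))
      PySem.Dict.empty
  -- score per guesser: sum of 40 table lookups
  let score : List Int := patterns.map (fun p =>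
    ((PySem.List.pyRange 0 40).map
      (fun r => cnt.getD (r, PySem.List.pyGetD p (PySem.Int.mod r (p.length : Int)) 0) 0)).sum)
  let m : Int := (PySem.List.max? score (fun x => x)).getD 0
  (PySem.List.enumerate score 0).filterMap
    (fun q : Int × Int => if q.2 = m then some (q.1 + 1) else none)

-- ===== PRECONDITION & SPEC =====
def Spec_solution (answers : List Int) (out : List Int) : Prop := out = solution_alt answers
instance (answers : List Int) (out : List Int) : Decidable (Spec_solution answers out) := by unfold Spec_solution; infer_instance

-- ===== CLAIM (what is proved, stated in full; the proofs are below) =====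
def Claim_equal_solution : Prop := ∀ (answers : List Int), Dom_solution answers → Spec_solution answers (solution answers)

-- ===== LEMMAS AND PROOFS =====

-- the answers, keyed by (index mod 40, value): what B's counter counts
def keyed (xs : List Int) : List (Int × Int) :=
  (PySem.List.enumerate xs 0).map (fun ia => (PySem.Int.mod ia.1 40, ia.2))

-- one component of A's interleaved score loop
def aScore (p : List Int) (L : Int) (xs : List Int) : Int :=
  (PySem.List.enumerate xs 0).foldl
    (fun (s : Int) (ia : Int × Int) =>
      if ia.2 = PySem.List.pyGetD p (PySem.Int.mod ia.1 L) 0 then s + 1 else s) 0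

-- B's counter lookup is a count of the keyed list
lemma cnt_getD (xs : List Int) (v : Int × Int) :
    ((PySem.List.enumerate xs 0).foldl
      (fun d ia =>
        d.insert (PySem.Int.mod ia.1 40, ia.2) (d.getD (PySem.Int.mod ia.1 40, ia.2) 0 + 1))
      PySem.Dict.empty).getD v 0 = ((keyed xs).count v : Int) := by
  have h := PySem.Dict.getD_foldl_insert_add_one (keyed xs) PySem.Dict.empty v
  rw [keyed, List.foldl_map] at h
  rw [keyed]
  simpa [PySem.Dict.getD_empty] using h

-- the 0/1 sum over range(40) picks out the unique matching residue
lemma sum_indicator (n40 : Int) (h0 : 0 ≤ n40) (h40 : n40 < 40) (x : Int) (pv : Int → Int) :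
    ((PySem.List.pyRange 0 40).map
      (fun r => if ((n40, x) : Int × Int) = (r, pv r) then (1 : Int) else 0)).sum
    = if x = pv n40 then 1 else 0 := by
  rw [PySem.List.pyRange_one_append 0 n40 40 h0 (le_of_lt h40),
      PySem.List.pyRange_one_cons h40]
  simp only [List.map_append, List.map_cons, List.sum_append, List.sum_cons]
  have hl : ((PySem.List.pyRange 0 n40).map
      (fun r => if ((n40, x) : Int × Int) = (r, pv r) then (1 : Int) else 0)).sum = 0 := by
    apply List.sum_eq_zero
    intro y hy
    obtain ⟨r, hr, rfl⟩ := List.mem_map.mp hy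
    have := (PySem.List.mem_pyRange_one).mp hr
    have hne : ((n40, x) : Int × Int) ≠ (r, pv r) := by
      intro hEq; exact absurd (congrArg Prod.fst hEq) (by simp; omega)
    simp [hne]
  have hrr : ((PySem.List.pyRange (n40 + 1) 40).map
      (fun r => if ((n40, x) : Int × Int) = (r, pv r) then (1 : Int) else 0)).sum = 0 := by
    apply List.sum_eq_zero
    intro y hy
    obtain ⟨r, hr, rfl⟩ := List.mem_map.mp hy
    have := (PySem.List.mem_pyRange_one).mp hr
    have hne : ((n40, x) : Int × Int) ≠ (r, pv r) := by
      intro hEq; exact absurd (congrArg Prod.fst hEq) (by simp; omega)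
    simp [hne]
  rw [hl, hrr]
  simp [Prod.ext_iff]

-- per pattern: B's 40 table lookups equal A's loop component
lemma bscore_eq (p : List Int) (L : Int) (hL : L = (p.length : Int)) (hdvd : p.length ∣ 40)
    (xs : List Int) :
    ((PySem.List.pyRange 0 40).map
      (fun r => ((keyed xs).count (r, PySem.List.pyGetD p (PySem.Int.mod r L) 0) : Int))).sum
    = aScore p L xs := by
  induction xs using List.reverseRecOn with
  | nil =>
    simp [keyed, aScore, PySem.List.enumerate_nil]
  | append_singleton xs x ih =>
    have hn : keyed (xs ++ [x])
        = keyed xs ++ [(PySem.Int.mod (xs.length : Int) 40, x)] := by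
      simp [keyed, PySem.List.enumerate_append, PySem.List.enumerate_cons,
        PySem.List.enumerate_nil]
    have ha : aScore p L (xs ++ [x])
        = if x = PySem.List.pyGetD p (PySem.Int.mod (xs.length : Int) L) 0
          then aScore p L xs + 1 else aScore p L xs := by
      simp only [aScore, PySem.List.enumerate_append, PySem.List.enumerate_cons,
        PySem.List.enumerate_nil, List.foldl_append, List.foldl_cons, List.foldl_nil,
        zero_add]
    have h40 : ((40 : Int)) = ((40 : Nat) : Int) := by norm_num
    have hmm : PySem.List.pyGetD p
          (PySem.Int.mod (PySem.Int.mod (xs.length : Int) 40) L) 0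
        = PySem.List.pyGetD p (PySem.Int.mod (xs.length : Int) L) 0 := by
      subst hL
      rw [h40, PySem.Int.mod_natCast, PySem.Int.mod_natCast, PySem.Int.mod_natCast,
        Nat.mod_mod_of_dvd xs.length hdvd]
    rw [hn, ha]
    simp only [List.count_append]
    push_cast
    rw [PySem.List.sum_map_add_int (PySem.List.pyRange 0 40)
        (fun r => ((keyed xs).count (r, PySem.List.pyGetD p (PySem.Int.mod r L) 0) : Int))
        (fun r => (List.count (r, PySem.List.pyGetD p (PySem.Int.mod r L) 0)
            [(PySem.Int.mod (xs.length : Int) 40, x)] : Int))]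
    rw [ih]
    have hc : (fun r => (List.count (r, PySem.List.pyGetD p (PySem.Int.mod r L) 0)
            [(PySem.Int.mod (xs.length : Int) 40, x)] : Int))
        = fun r => if ((PySem.Int.mod (xs.length : Int) 40, x) : Int × Int)
            = (r, PySem.List.pyGetD p (PySem.Int.mod r L) 0) then (1 : Int) else 0 := by
      funext r
      simp [List.count_singleton, beq_iff_eq]
    rw [hc, sum_indicator (PySem.Int.mod (xs.length : Int) 40)
        (PySem.Int.mod_nonneg _ (by norm_num)) (PySem.Int.mod_lt _ (by norm_num)) x
        (fun r => PySem.List.pyGetD p (PySem.Int.mod r L) 0), hmm]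
    split_ifs <;> ring

-- the collect step: A's append-loop equals B's filterMap on a 3-element list
lemma collect_eq (s0 s1 s2 m : Int) :
    (PySem.List.enumerate [s0, s1, s2] 0).foldl
      (fun acc (p : Int × Int) => if p.2 = m then acc ++ [p.1 + 1] else acc) []
    = (PySem.List.enumerate [s0, s1, s2] 0).filterMap
      (fun q : Int × Int => if q.2 = m then some (q.1 + 1) else none) := by
  simp only [PySem.List.enumerate_cons, PySem.List.enumerate_nil, List.foldl_cons,
    List.foldl_nil, List.filterMap]
  split_ifs <;> simp

-- ===== VERDICT (by name: the statement is the Claim_ definition above) =====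
theorem solution_spec : Claim_equal_solution := by
  intro answers _
  show solution answers = solution_alt answers
  simp only [solution, solution_alt, List.map]
  rw [PySem.List.foldl_prod_mk
        (f := fun (s : Int) (ia : Int × Int) =>
          if ia.2 = PySem.List.pyGetD [1, 2, 3, 4, 5] (PySem.Int.mod ia.1 5) 0 then s + 1 else s)
        (g := fun (s : Int × Int) (ia : Int × Int) =>
          (if ia.2 = PySem.List.pyGetD [2, 1, 2, 3, 2, 4, 2, 5] (PySem.Int.mod ia.1 8) 0 then s.1 + 1 else s.1,
           if ia.2 = PySem.List.pyGetD [3, 3, 1, 1, 2, 2, 4, 4, 5, 5] (PySem.Int.mod ia.1 10) 0 then s.2 + 1 else s.2))]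
  rw [PySem.List.foldl_prod_mk
        (f := fun (s : Int) (ia : Int × Int) =>
          if ia.2 = PySem.List.pyGetD [2, 1, 2, 3, 2, 4, 2, 5] (PySem.Int.mod ia.1 8) 0 then s + 1 else s)
        (g := fun (s : Int) (ia : Int × Int) =>
          if ia.2 = PySem.List.pyGetD [3, 3, 1, 1, 2, 2, 4, 4, 5, 5] (PySem.Int.mod ia.1 10) 0 then s + 1 else s)]
  simp only [cnt_getD]
  simp only [show (([1, 2, 3, 4, 5] : List Int).length : Int) = 5 from by norm_num,
    show (([2, 1, 2, 3, 2, 4, 2, 5] : List Int).length : Int) = 8 from by norm_num,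
    show (([3, 3, 1, 1, 2, 2, 4, 4, 5, 5] : List Int).length : Int) = 10 from by norm_num]
  rw [bscore_eq [1, 2, 3, 4, 5] 5 (by norm_num) (by norm_num) answers]
  rw [bscore_eq [2, 1, 2, 3, 2, 4, 2, 5] 8 (by norm_num) (by norm_num) answers]
  rw [bscore_eq [3, 3, 1, 1, 2, 2, 4, 4, 5, 5] 10 (by norm_num) (by norm_num) answers]
  exact collect_eq _ _ _ _
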